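-- pv_equiv track=rewrite | github.com/Silas003/DSA | list.py | repeating_elements
-- ===== SOURCE A (Python) =====
-- def repeating_elements(nums):
--     values=set()
--     for i in nums:
--         count=0
--         for j in nums:
--             if abs(i)==abs(j):
--                 count+=1
--                 if count>=2:
--                     values.add(i)
--     return list(values)
-- ===== SOURCE B (Python) =====
-- def repeating_elements(nums):
--     counts = {}
--     for x in nums:
--         a = abs(x)
--         counts[a] = counts.get(a, 0) + 1
--     values = set()
--     for x in nums:
--         if counts[abs(x)] >= 2:
--             values.add(x)
--     return list(values)
-- ===== Notes on version B (the rewrite author's own statement) =====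
-- stated objective: faster
-- what changed: Replaces the nested O(n^2) scans with one pass building a dict of absolute-value counts and a second pass collecting elements whose count is >= 2.
import Mathlib
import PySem

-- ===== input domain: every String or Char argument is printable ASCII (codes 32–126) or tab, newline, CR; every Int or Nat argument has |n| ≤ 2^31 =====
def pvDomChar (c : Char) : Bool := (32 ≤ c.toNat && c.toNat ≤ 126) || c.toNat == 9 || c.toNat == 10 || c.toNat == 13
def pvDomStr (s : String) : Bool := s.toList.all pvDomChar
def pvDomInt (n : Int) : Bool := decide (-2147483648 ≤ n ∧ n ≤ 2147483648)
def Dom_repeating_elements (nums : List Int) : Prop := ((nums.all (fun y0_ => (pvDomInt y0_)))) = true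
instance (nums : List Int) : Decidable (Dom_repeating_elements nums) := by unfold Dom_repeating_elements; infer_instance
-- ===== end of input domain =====

-- B replaces A's nested O(n^2) scans with one counting pass over a dict keyed by abs plus one collection pass (faster).
-- Both programs build the same Python set by the same insertion sequence, so list(values) agrees.

-- ===== PORT A =====
def repeating_elements (nums : List Int) : List Int :=
  nums.foldl (fun values i =>
    (nums.foldl (fun (st : Int × PySem.Set Int) j =>
        if |i| = |j| then
          let count := st.1 + 1
          if 2 ≤ count then (count, PySem.Set.add st.2 i) else (count, st.2)
        else st) (0, values)).2)
    PySem.Set.empty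

-- ===== PORT B =====
def repeating_elements_alt (nums : List Int) : List Int :=
  let counts := nums.foldl (fun d x => PySem.Dict.modify d |x| 0 (fun c => c + 1))
    (PySem.Dict.empty : PySem.Dict Int Int)
  nums.foldl (fun values x =>
    if 2 ≤ counts.getD |x| 0 then PySem.Set.add values x else values) PySem.Set.empty

-- ===== PRECONDITION & SPEC =====
def Spec_repeating_elements (nums : List Int) (out : List Int) : Prop := out = repeating_elements_alt nums
instance (nums : List Int) (out : List Int) : Decidable (Spec_repeating_elements nums out) := by unfold Spec_repeating_elements; infer_instance

-- ===== CLAIM (what is proved, stated in full; the proofs are below) =====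
def Claim_equal_repeating_elements : Prop := ∀ (nums : List Int), Dom_repeating_elements nums → Spec_repeating_elements nums (repeating_elements nums)

-- ===== LEMMAS AND PROOFS =====

theorem set_add_add_self (s : PySem.Set Int) (x : Int) :
    PySem.Set.add (PySem.Set.add s x) x = PySem.Set.add s x := by
  simp only [PySem.Set.add, PySem.Set.contains]
  split_ifs with h <;> simp_all

-- A's inner loop over l, started at count c0: the final count is c0 plus the number of
-- matches in l, and i gets added exactly when that count reached 2 during the scan.
theorem innerA (i : Int) (l : List Int) (c0 : Int) (v : PySem.Set Int) :
    l.foldl (fun (st : Int × PySem.Set Int) j =>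
        if |i| = |j| then
          let count := st.1 + 1
          if 2 ≤ count then (count, PySem.Set.add st.2 i) else (count, st.2)
        else st) (c0, v)
    = (c0 + l.countP (fun j => |i| = |j|),
       if 2 ≤ c0 + (l.countP (fun j => |i| = |j|) : Int) ∧ 1 ≤ l.countP (fun j => |i| = |j|)
       then PySem.Set.add v i else v) := by
  induction l generalizing c0 v with
  | nil => simp
  | cons j l ih =>
    simp only [List.foldl_cons, List.countP_cons]
    by_cases hj : |i| = |j|
    · rw [if_pos hj, if_pos (show (decide (|i| = |j|)) = true by simp [hj])]
      by_cases hc : 2 ≤ c0 + 1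
      · rw [if_pos hc, ih, set_add_add_self]
        refine Prod.ext (by push_cast; ring) ?_
        rw [ite_self, if_pos (⟨by push_cast; omega, by omega⟩ :
          2 ≤ c0 + ((l.countP (fun j => decide (|i| = |j|)) + 1 : Nat) : Int) ∧
            1 ≤ l.countP (fun j => decide (|i| = |j|)) + 1)]
      · rw [if_neg hc, ih]
        refine Prod.ext (by push_cast; ring) (if_congr ?_ rfl rfl)
        constructor
        · rintro ⟨a, b⟩; exact ⟨by push_cast at a ⊢; omega, by omega⟩
        · rintro ⟨a, b⟩; exact ⟨by push_cast at a ⊢; omega, by push_cast at a; omega⟩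
    · rw [if_neg hj, if_neg (show ¬ (decide (|i| = |j|)) = true by simp [hj])]
      simpa using ih c0 v

-- B's counter looked up at |x| is the number of elements of nums with the same absolute value.
theorem counts_getD (nums : List Int) (x : Int) :
    (nums.foldl (fun d y => PySem.Dict.modify d |y| 0 (fun c => c + 1))
      (PySem.Dict.empty : PySem.Dict Int Int)).getD |x| 0
    = (nums.countP (fun j => |x| = |j|) : Int) := by
  rw [← List.foldl_map (f := fun y : Int => |y|)
      (g := fun d k => PySem.Dict.modify d k 0 (fun c => c + 1)),
    PySem.Dict.getD_foldl_modify_add_one]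
  have h0 : (PySem.Dict.empty : PySem.Dict Int Int).getD |x| 0 = 0 := rfl
  rw [h0, zero_add, List.count_eq_countP, List.countP_map]
  congr 1
  apply List.countP_congr
  intro a _
  simp only [Function.comp_def, beq_iff_eq, decide_eq_true_eq]
  exact eq_comm

theorem repeating_elements_spec : Claim_equal_repeating_elements := by
  intro nums _
  show repeating_elements nums = repeating_elements_alt nums
  have hz : repeating_elements_alt nums = nums.foldl (fun values x =>
      if 2 ≤ (nums.foldl (fun d y => PySem.Dict.modify d |y| 0 (fun c => c + 1))
          (PySem.Dict.empty : PySem.Dict Int Int)).getD |x| 0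
      then PySem.Set.add values x else values) PySem.Set.empty := by
    simp only [repeating_elements_alt]
  rw [hz]
  unfold repeating_elements
  have hstep : ∀ (v : PySem.Set Int) (i : Int),
      (nums.foldl (fun (st : Int × PySem.Set Int) j =>
          if |i| = |j| then
            let count := st.1 + 1
            if 2 ≤ count then (count, PySem.Set.add st.2 i) else (count, st.2)
          else st) (0, v)).2
      = (if 2 ≤ (nums.foldl (fun d y => PySem.Dict.modify d |y| 0 (fun c => c + 1))
            (PySem.Dict.empty : PySem.Dict Int Int)).getD |i| 0
         then PySem.Set.add v i else v) := by
    intro v i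
    rw [innerA, counts_getD nums i]
    show (if 2 ≤ 0 + ((nums.countP (fun j => |i| = |j|)) : Int) ∧
          1 ≤ nums.countP (fun j => |i| = |j|) then PySem.Set.add v i else v) = _
    refine if_congr ?_ rfl rfl
    constructor
    · rintro ⟨a, _⟩; omega
    · intro h; exact ⟨by omega, by omega⟩
  rw [funext (fun v => funext (fun i => hstep v i))]
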